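-- pv_equiv track=rewrite | github.com/tatoliop/seizure-detection | metrics/metrics.py | __new_sequence
-- ===== SOURCE A (Python) =====
-- def __new_sequence(label, sequence_original, window):
--     a = max(sequence_original[0][0] - window // 2, 0)
--     sequence_new = []
--     for i in range(len(sequence_original) - 1):
--         if sequence_original[i][1] + window // 2 < sequence_original[i + 1][0] - window // 2:
--             sequence_new.append((a, sequence_original[i][1] + window // 2))
--             a = sequence_original[i + 1][0] - window // 2
--     sequence_new.append((a, min(sequence_original[len(sequence_original) - 1][1] + window // 2, len(label) - 1)))
--     return sequence_new
-- ===== SOURCE B (Python) =====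
-- def __new_sequence(label, sequence_original, window):
--     w = window // 2
--     # Walk the intervals RIGHT-TO-LEFT, maintaining the merged padded result
--     # for the suffix seen so far (kept back-to-front so its logical front,
--     # rev[-1], is extended or prepended in O(1)).
--     rev = []
--     for s, e in reversed(sequence_original):
--         if rev and not (e + w < rev[-1][0]):
--             rev[-1] = (s - w, rev[-1][1])
--         else:
--             rev.append((s - w, e + w))
--     out = list(reversed(rev))
--     out[0] = (max(out[0][0], 0), out[0][1])
--     out[-1] = (out[-1][0], min(out[-1][1], len(label) - 1))
--     return out
-- ===== Notes on version B (the rewrite author's own statement) =====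
-- stated objective: alternative
-- what changed: A scans left-to-right carrying a pending start 'a' and emitting at each gap; B traverses the intervals right-to-left, folding each padded interval into the already-merged suffix (built back-to-front), and applies the boundary clamps as a separate final step.
import Mathlib
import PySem

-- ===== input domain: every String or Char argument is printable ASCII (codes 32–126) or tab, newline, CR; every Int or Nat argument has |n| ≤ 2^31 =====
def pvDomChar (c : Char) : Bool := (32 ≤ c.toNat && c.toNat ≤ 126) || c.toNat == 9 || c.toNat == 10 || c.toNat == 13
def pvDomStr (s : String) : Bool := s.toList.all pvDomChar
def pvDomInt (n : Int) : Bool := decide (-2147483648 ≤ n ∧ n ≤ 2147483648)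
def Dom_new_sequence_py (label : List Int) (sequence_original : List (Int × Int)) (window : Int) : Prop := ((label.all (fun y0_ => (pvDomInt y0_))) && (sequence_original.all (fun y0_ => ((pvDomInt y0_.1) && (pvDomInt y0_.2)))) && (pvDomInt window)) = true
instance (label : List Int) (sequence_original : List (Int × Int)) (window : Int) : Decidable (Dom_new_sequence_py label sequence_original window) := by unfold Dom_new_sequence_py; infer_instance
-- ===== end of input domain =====

-- B replaces A's left-to-right gap-carrying accumulator loop by a right-to-left fold that
-- merges each padded interval into the already-merged suffix, with the boundary clamps done
-- as a separate final step (same return values; both raise on an empty sequence).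

-- ===== PORT A =====
-- A's for-loop over i, carrying 'a' and the previous end; the final append is the base case.
def nsALoop (w lbl a eprev : Int) : List (Int × Int) → List (Int × Int)
  | [] => [(a, min (eprev + w) lbl)]
  | (s, e) :: rest =>
    if eprev + w < s - w then
      (a, eprev + w) :: nsALoop w lbl (s - w) e rest
    else
      nsALoop w lbl a e rest

def new_sequence_py (label : List Int) (sequence_original : List (Int × Int)) (window : Int) : List (Int × Int) :=
  match sequence_original with
  | [] => []  -- Python raises IndexError here; excluded by Pre_
  | (s0, e0) :: rest =>
    let w := PySem.Int.floordiv window 2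
    nsALoop w ((label.length : Int) - 1) (max (s0 - w) 0) e0 rest

-- ===== PORT B =====
-- Source B's loop runs over reversed(sequence_original) extending the logical FRONT (rev[-1])
-- of the merged suffix; that right-to-left loop is exactly this foldr step.
def nsStep (w : Int) (x : Int × Int) (acc : List (Int × Int)) : List (Int × Int) :=
  match acc with
  | [] => [(x.1 - w, x.2 + w)]
  | (lo, hi) :: R =>
    if x.2 + w < lo then (x.1 - w, x.2 + w) :: (lo, hi) :: R
    else (x.1 - w, hi) :: R

def nsClampFirst : List (Int × Int) → List (Int × Int)
  | [] => []
  | (lo, hi) :: rest => (max lo 0, hi) :: rest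

def nsClampLast (lbl : Int) : List (Int × Int) → List (Int × Int)
  | [] => []
  | [(lo, hi)] => [(lo, min hi lbl)]
  | p :: q :: rest => p :: nsClampLast lbl (q :: rest)

def new_sequence_py_alt (label : List Int) (sequence_original : List (Int × Int)) (window : Int) : List (Int × Int) :=
  let w := PySem.Int.floordiv window 2
  let merged := sequence_original.foldr (nsStep w) []
  match merged with
  | [] => []  -- Python raises IndexError here; excluded by Pre_
  | _ :: _ => nsClampLast ((label.length : Int) - 1) (nsClampFirst merged)

-- ===== PRECONDITION & SPEC =====
-- Both programs raise IndexError on an empty sequence_original; Pre_ excludes exactly that.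
def Pre_new_sequence_py (label : List Int) (sequence_original : List (Int × Int)) (window : Int) : Prop :=
  sequence_original ≠ []
instance (label : List Int) (sequence_original : List (Int × Int)) (window : Int) : Decidable (Pre_new_sequence_py label sequence_original window) := by unfold Pre_new_sequence_py; infer_instance

def pvWitness_new_sequence_py : List Int × (List (Int × Int)) × Int := ([0, 0, 0, 0, 0], [(0, 1), (3, 4)], 2)

def Spec_new_sequence_py (label : List Int) (sequence_original : List (Int × Int)) (window : Int) (out : List (Int × Int)) : Prop := out = new_sequence_py_alt label sequence_original window
instance (label : List Int) (sequence_original : List (Int × Int)) (window : Int) (out : List (Int × Int)) : Decidable (Spec_new_sequence_py label sequence_original window out) := by unfold Spec_new_sequence_py; infer_instance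

-- ===== CLAIM (what is proved, stated in full; the proofs are below) =====
def Claim_equal_new_sequence_py : Prop := ∀ (label : List Int) (sequence_original : List (Int × Int)) (window : Int), Dom_new_sequence_py label sequence_original window → Pre_new_sequence_py label sequence_original window → Spec_new_sequence_py label sequence_original window (new_sequence_py label sequence_original window)

-- ===== LEMMAS AND PROOFS =====

-- B's fold never returns the empty list on a nonempty input.
lemma ns_fold_ne_nil (w : Int) : ∀ (x : Int × Int) (l : List (Int × Int)),
    ∃ lo hi R, ((x :: l).foldr (nsStep w) []) = (lo, hi) :: R := by
  intro x l
  rw [List.foldr_cons]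
  cases hT : l.foldr (nsStep w) [] with
  | nil => exact ⟨x.1 - w, x.2 + w, [], by simp [nsStep]⟩
  | cons p R =>
    obtain ⟨lo, hi⟩ := p
    by_cases h2 : x.2 + w < lo
    · exact ⟨x.1 - w, x.2 + w, (lo, hi) :: R, by simp [nsStep, h2]⟩
    · exact ⟨x.1 - w, hi, R, by simp [nsStep, h2]⟩

-- A's loop with pending start a and previous end e, on a nonempty remainder, expressed
-- through B's right fold of that remainder.
lemma ns_key (w lbl : Int) :
    ∀ (tl : List (Int × Int)) (s e' a e : Int),
      nsALoop w lbl a e ((s, e') :: tl)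
        = match ((s, e') :: tl).foldr (nsStep w) [] with
          | [] => []
          | (lo, hi) :: R =>
            if e + w < lo then (a, e + w) :: nsClampLast lbl ((lo, hi) :: R)
            else nsClampLast lbl ((a, hi) :: R) := by
  intro tl
  induction tl with
  | nil =>
    intro s e' a e
    by_cases h : e + w < s - w <;>
      simp [nsALoop, nsStep, nsClampLast, h]
  | cons hd' tl' ih =>
    intro s e' a e
    obtain ⟨s2, e2⟩ := hd'
    obtain ⟨lo2, hi2, R2, hF⟩ := ns_fold_ne_nil w (s2, e2) tl'
    have hOuter : (((s, e') :: (s2, e2) :: tl').foldr (nsStep w) [])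
        = nsStep w (s, e') ((lo2, hi2) :: R2) := by
      rw [List.foldr_cons, hF]
    by_cases h : e + w < s - w
    · rw [show nsALoop w lbl a e ((s, e') :: (s2, e2) :: tl')
            = (a, e + w) :: nsALoop w lbl (s - w) e' ((s2, e2) :: tl') from by
          simp [nsALoop, h]]
      rw [ih s2 e2 (s - w) e', hF, hOuter]
      by_cases h2 : e' + w < lo2 <;>
        simp [nsStep, nsClampLast, h, h2]
    · rw [show nsALoop w lbl a e ((s, e') :: (s2, e2) :: tl')
            = nsALoop w lbl a e' ((s2, e2) :: tl') from by
          simp [nsALoop, h]]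
      rw [ih s2 e2 a e', hF, hOuter]
      by_cases h2 : e' + w < lo2 <;>
        simp [nsStep, nsClampLast, h, h2]

-- ===== VERDICT (by name: the statement is the Claim_ definition above) =====
theorem new_sequence_py_spec : Claim_equal_new_sequence_py := by
  intro label seq window _ hpre
  unfold Spec_new_sequence_py
  cases seq with
  | nil => exact absurd rfl hpre
  | cons hd rest =>
    obtain ⟨s0, e0⟩ := hd
    show nsALoop (PySem.Int.floordiv window 2) ((label.length : Int) - 1)
          (max (s0 - PySem.Int.floordiv window 2) 0) e0 rest
        = match ((s0, e0) :: rest).foldr (nsStep (PySem.Int.floordiv window 2)) [] with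
          | [] => []
          | _ :: _ => nsClampLast ((label.length : Int) - 1)
              (nsClampFirst (((s0, e0) :: rest).foldr (nsStep (PySem.Int.floordiv window 2)) []))
    generalize PySem.Int.floordiv window 2 = w
    cases rest with
    | nil =>
      simp [nsStep, nsClampFirst, nsClampLast, nsALoop]
    | cons hd' tl' =>
      obtain ⟨lo, hi, R, hF⟩ := ns_fold_ne_nil w hd' tl'
      have hOuter : (((s0, e0) :: hd' :: tl').foldr (nsStep w) [])
          = nsStep w (s0, e0) ((lo, hi) :: R) := by
        rw [List.foldr_cons, hF]
      obtain ⟨s1, e1⟩ := hd'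
      rw [ns_key w ((label.length : Int) - 1) tl' s1 e1 (max (s0 - w) 0) e0, hF, hOuter]
      by_cases h : e0 + w < lo <;>
        simp [nsStep, nsClampFirst, nsClampLast, h]
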